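-- pv_equiv track=rewrite | github.com/nod-ai/SHARK-Studio | shark/sharding_utils/split_mlir_file.py | _find_safe_splits
-- ===== SOURCE A (Python) =====
-- def _find_safe_splits(lines, function_name):
--     in_clause = False
--     in_function = False
--     safe_splits = []
--     bracket_debt = 0
--     for line, i in zip(lines, range(len(lines))):
--         if f"%0" in line:
--             in_function = True
--         if in_function:
--             if not in_clause:
--                 safe_splits.append(i)
--             open_brackets = line.count("{")
--             close_brackets = line.count("}")
--             bracket_diff = open_brackets - close_brackets
--             bracket_debt += bracket_diff
--             if bracket_debt == 0:
--                 in_clause = False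
--             elif bracket_debt != 0:
--                 in_clause = True
--
--     return safe_splits
-- ===== SOURCE B (Python) =====
-- def _find_safe_splits(lines, function_name):
--     start = next((i for i, l in enumerate(lines) if "%0" in l), None)
--     if start is None:
--         return []
--     safe_splits = []
--     n = len(lines)
--     k = start
--     while k < n:
--         safe_splits.append(k)
--         # consume this block: advance until the brace balance closes back to zero
--         bal = lines[k].count("{") - lines[k].count("}")
--         k += 1
--         while k < n and bal != 0:
--             bal += lines[k].count("{") - lines[k].count("}")
--             k += 1
--         if bal != 0:
--             break
--     return safe_splits
-- ===== Notes on version B (the rewrite author's own statement) =====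
-- stated objective: alternative
-- what changed: Replaces A's two-flag every-line state machine with an emit-then-skip block walk: find the first "%0" line, then an outer loop emits a safe index and an inner loop jumps over the whole brace-balanced block that starts there, breaking early if a block never closes.
import Mathlib
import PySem

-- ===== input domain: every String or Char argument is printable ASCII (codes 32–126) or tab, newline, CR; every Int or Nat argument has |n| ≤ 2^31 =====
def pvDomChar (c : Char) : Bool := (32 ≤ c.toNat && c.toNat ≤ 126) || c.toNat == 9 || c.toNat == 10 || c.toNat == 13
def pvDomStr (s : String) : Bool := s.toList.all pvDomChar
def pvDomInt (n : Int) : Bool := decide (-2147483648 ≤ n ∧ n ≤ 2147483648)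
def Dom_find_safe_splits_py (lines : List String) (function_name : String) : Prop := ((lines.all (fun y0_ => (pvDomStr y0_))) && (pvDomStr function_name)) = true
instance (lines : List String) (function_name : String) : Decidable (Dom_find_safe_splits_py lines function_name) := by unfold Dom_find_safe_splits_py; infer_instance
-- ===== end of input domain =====

-- B replaces A's two-flag every-line state machine by an emit-then-skip block walk: find the
-- first "%0" line, then repeatedly emit a safe index and skip over the brace-balanced block
-- starting there, breaking early if a block never closes (objective: alternative).

-- ===== PORT A =====
-- for line, i in zip(lines, range(len(lines))): pairs ported as enumerate (i, line)
def find_safe_splits_py (lines : List String) (function_name : String) : List Int :=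
  let st := (PySem.List.enumerate lines 0).foldl
    (fun (st : Bool × Bool × List Int × Int) (p : Int × String) =>
      let in_clause := st.1
      let in_function := st.2.1
      let safe_splits := st.2.2.1
      let bracket_debt := st.2.2.2
      let in_function := if PySem.Str.isIn "%0" p.2 then true else in_function
      if in_function then
        let safe_splits := if !in_clause then safe_splits ++ [p.1] else safe_splits
        let bracket_diff := (PySem.Str.count p.2 "{" : Int) - (PySem.Str.count p.2 "}" : Int)
        let bracket_debt := bracket_debt + bracket_diff
        let in_clause := if bracket_debt = 0 then false else true
        (in_clause, in_function, safe_splits, bracket_debt)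
      else
        (in_clause, in_function, safe_splits, bracket_debt))
    (false, false, ([] : List Int), (0 : Int))
  st.2.2.1

-- ===== PORT B =====
-- Source B's outer while loop (emit a safe index, then enter the inner skip loop) and its inner
-- while loop (consume lines until the block's balance closes, else break) become the mutual
-- pair pvBlocks / pvRest over the remaining lines, carrying the same state (balance, index).
mutual
def pvBlocks : List String → Int → List Int
  | [], _ => []
  | l :: ls, i =>
    i :: pvRest ls ((PySem.Str.count l "{" : Int) - (PySem.Str.count l "}" : Int)) (i + 1)
termination_by ls _ => (ls.length, 0)

def pvRest : List String → Int → Int → List Int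
  | ls, bal, j =>
    if bal = 0 then pvBlocks ls j
    else match ls with
      | [] => []
      | l :: ls' =>
        pvRest ls' (bal + ((PySem.Str.count l "{" : Int) - (PySem.Str.count l "}" : Int))) (j + 1)
termination_by ls _ _ => (ls.length, 1)
end

def find_safe_splits_py_alt (lines : List String) (function_name : String) : List Int :=
  match lines.findIdx? (fun l => PySem.Str.isIn "%0" l) with
  | none => []
  | some start => pvBlocks (lines.drop start) (start : Int)

-- ===== PRECONDITION & SPEC =====
def Spec_find_safe_splits_py (lines : List String) (function_name : String) (out : List Int) : Prop := out = find_safe_splits_py_alt lines function_name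
instance (lines : List String) (function_name : String) (out : List Int) : Decidable (Spec_find_safe_splits_py lines function_name out) := by unfold Spec_find_safe_splits_py; infer_instance

-- ===== CLAIM (what is proved, stated in full; the proofs are below) =====
def Claim_equal_find_safe_splits_py : Prop := ∀ (lines : List String) (function_name : String), Dom_find_safe_splits_py lines function_name → Spec_find_safe_splits_py lines function_name (find_safe_splits_py lines function_name)

-- ===== LEMMAS AND PROOFS =====

-- per-line bracket difference
def pvDiff (l : String) : Int := (PySem.Str.count l "{" : Int) - (PySem.Str.count l "}" : Int)

-- reference value: indices (from i) of lines whose preceding balance (from d) is zero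
def pvCollect : List String → Int → Int → List Int
  | [], _, _ => []
  | l :: ls, d, i => (if d = 0 then [i] else []) ++ pvCollect ls (d + pvDiff l) (i + 1)

theorem pv_both (ts : List String) :
    (∀ i, pvBlocks ts i = pvCollect ts 0 i) ∧ (∀ bal j, pvRest ts bal j = pvCollect ts bal j) := by
  induction ts with
  | nil =>
    constructor
    · intro i; simp [pvBlocks, pvCollect]
    · intro bal j; rw [pvRest]; by_cases h : bal = 0 <;> simp [h, pvBlocks, pvCollect]
  | cons l ls ih =>
    have hB : ∀ i, pvBlocks (l :: ls) i = pvCollect (l :: ls) 0 i := by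
      intro i
      rw [pvBlocks, ih.2, pvCollect]
      simp [pvDiff]
    refine ⟨hB, ?_⟩
    intro bal j
    rw [pvRest]
    by_cases h : bal = 0
    · simp only [h, if_true]; exact hB j
    · simp only [h, if_false]
      rw [ih.2, pvCollect]
      simp [h, pvDiff]

theorem pv_loopA (ts : List String) (d : Int) (acc : List Int) (i : Int) :
    ((PySem.List.enumerate ts i).foldl
      (fun (st : Bool × Bool × List Int × Int) (p : Int × String) =>
        let in_clause := st.1
        let in_function := st.2.1
        let safe_splits := st.2.2.1
        let bracket_debt := st.2.2.2
        let in_function := if PySem.Str.isIn "%0" p.2 then true else in_function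
        if in_function then
          let safe_splits := if !in_clause then safe_splits ++ [p.1] else safe_splits
          let bracket_diff := (PySem.Str.count p.2 "{" : Int) - (PySem.Str.count p.2 "}" : Int)
          let bracket_debt := bracket_debt + bracket_diff
          let in_clause := if bracket_debt = 0 then false else true
          (in_clause, in_function, safe_splits, bracket_debt)
        else
          (in_clause, in_function, safe_splits, bracket_debt))
      ((if d = 0 then false else true), true, acc, d)).2.2.1
    = acc ++ pvCollect ts d i := by
  induction ts generalizing d acc i with
  | nil => simp [pvCollect, PySem.List.enumerate]
  | cons l ls ih =>
    simp only [PySem.List.enumerate_cons, List.foldl_cons, pvCollect]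
    by_cases hd : d = 0
    · simp only [hd, ite_self, Bool.not_false, if_true]
      have h := ih (0 + pvDiff l) (acc ++ [i]) (i + 1)
      simp only [pvDiff] at h
      simpa [List.append_assoc] using h
    · simp only [if_neg hd, ite_self, Bool.not_true, Bool.false_eq_true, if_false]
      have h := ih (d + pvDiff l) acc (i + 1)
      simp only [pvDiff] at h
      simpa using h

theorem pv_mainA (ls : List String) (i : Int) :
    ((PySem.List.enumerate ls i).foldl
      (fun (st : Bool × Bool × List Int × Int) (p : Int × String) =>
        let in_clause := st.1
        let in_function := st.2.1
        let safe_splits := st.2.2.1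
        let bracket_debt := st.2.2.2
        let in_function := if PySem.Str.isIn "%0" p.2 then true else in_function
        if in_function then
          let safe_splits := if !in_clause then safe_splits ++ [p.1] else safe_splits
          let bracket_diff := (PySem.Str.count p.2 "{" : Int) - (PySem.Str.count p.2 "}" : Int)
          let bracket_debt := bracket_debt + bracket_diff
          let in_clause := if bracket_debt = 0 then false else true
          (in_clause, in_function, safe_splits, bracket_debt)
        else
          (in_clause, in_function, safe_splits, bracket_debt))
      (false, false, ([] : List Int), (0 : Int))).2.2.1
    = match ls.findIdx? (fun l => PySem.Str.isIn "%0" l) with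
      | none => []
      | some s => pvCollect (ls.drop s) 0 (i + (s : Int)) := by
  induction ls generalizing i with
  | nil => simp [PySem.List.enumerate]
  | cons l ls ih =>
    simp only [PySem.List.enumerate_cons, List.foldl_cons, List.findIdx?_cons]
    by_cases hl : PySem.Str.isIn "%0" l
    · simp only [hl, if_true, Bool.not_false]
      have h := pv_loopA ls (0 + pvDiff l) ([] ++ [i]) (i + 1)
      simp only [pvDiff] at h
      simp only [List.nil_append] at h ⊢
      exact h.trans (by simp [pvCollect, pvDiff])
    · simp only [hl, if_false, Bool.false_eq_true]
      rw [ih (i + 1)]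
      cases h : ls.findIdx? (fun l => PySem.Str.isIn "%0" l) with
      | none => simp
      | some s => simp [add_assoc, add_comm 1 (s : Int)]

-- ===== VERDICT (by name: the statement is the Claim_ definition above) =====
theorem find_safe_splits_py_spec : Claim_equal_find_safe_splits_py := by
  intro lines function_name _
  unfold Spec_find_safe_splits_py find_safe_splits_py find_safe_splits_py_alt
  rw [pv_mainA lines 0]
  cases h : lines.findIdx? (fun l => PySem.Str.isIn "%0" l) with
  | none => rfl
  | some s => simp only []; rw [(pv_both (lines.drop s)).1]; simp
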